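-- pv_equiv track=rewrite | github.com/mcjcode/number-theory | modular_groups.py | name_to_latex
-- ===== SOURCE A (Python) =====
-- def name_to_latex(name):
--     retval = '$'
--     i = 0
--     while i < len(name):
--         cc = name[i]
--         j = 1
--         while i+j < len(name):
--             if name[i+j]==cc:
--                 j += 1
--             else:
--                 break
--         if cc=='T':
--             if j==1:
--                 retval += 'T'
--             else:
--                 retval += 'T^{%d}' % (j,)
--         elif cc=='U':
--             retval += 'T^{%d}' % (-j,)
--         elif cc=='S':
--             if j%2==1:
--                 retval += 'S'
--         else: # cc=='I'
--             pass
--         i += j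
--     retval += '$'
--     if retval=='$$':
--         retval='$I$'
--     return retval
-- ===== SOURCE B (Python) =====
-- def name_to_latex(name):
--     def piece(c, n):
--         if c == 'T':
--             return 'T' if n == 1 else 'T^{%d}' % (n,)
--         if c == 'U':
--             return 'T^{%d}' % (-n,)
--         if c == 'S':
--             return 'S' if n % 2 else ''
--         return ''
--     # single left-to-right pass with a pending-run accumulator: no lookahead,
--     # emit the pending run's piece whenever the character changes, flush at the end
--     body = ''
--     prev, count = None, 0
--     for ch in name:
--         if prev is not None and ch == prev:
--             count += 1
--         else:
--             if prev is not None: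
--                 body += piece(prev, count)
--             prev, count = ch, 1
--     if prev is not None:
--         body += piece(prev, count)
--     return '$%s$' % (body,) if body else '$I$'
-- ===== Notes on version B (the rewrite author's own statement) =====
-- stated objective: alternative
-- what changed: Replaces A's nested while loops (outer cursor plus inner lookahead scan counting each run before emitting) with a single left-to-right pass carrying a pending-run accumulator (prev char, count) that emits a run's piece only when the character changes, with a final flush; the identity case is formatted directly from the empty body instead of post-checking the wrapped result.
import Mathlib
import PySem

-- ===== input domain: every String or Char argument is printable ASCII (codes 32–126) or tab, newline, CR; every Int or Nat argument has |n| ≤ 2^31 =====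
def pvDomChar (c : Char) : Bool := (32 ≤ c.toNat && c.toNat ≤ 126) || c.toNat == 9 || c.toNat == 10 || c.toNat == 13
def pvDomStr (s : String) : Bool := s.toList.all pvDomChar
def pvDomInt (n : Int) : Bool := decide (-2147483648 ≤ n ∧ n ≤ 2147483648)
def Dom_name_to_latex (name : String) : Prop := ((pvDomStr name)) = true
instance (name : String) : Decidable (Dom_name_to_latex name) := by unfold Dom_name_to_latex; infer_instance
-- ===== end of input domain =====

-- B replaces A's nested index-based while loops (lookahead run counting) by a single
-- left-to-right pass carrying a pending-run accumulator, emitting on character change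
-- (objective: alternative; same cost).

-- ===== PORT A =====
-- inner while loop of A: number of further chars equal to cc at the front
def pvCountRun (cc : Char) : List Char → Nat
  | [] => 0
  | x :: xs => if x == cc then 1 + pvCountRun cc xs else 0

-- outer while loop of A, accumulating retval
def pvLoopA : List Char → String → String
  | [], retval => retval
  | cc :: rest, retval =>
      let j := 1 + pvCountRun cc rest
      let piece :=
        if cc == 'T' then (if j == 1 then "T" else "T^{" ++ PySem.Int.toStr (j : Int) ++ "}")
        else if cc == 'U' then "T^{" ++ PySem.Int.toStr (-(j : Int)) ++ "}"
        else if cc == 'S' then (if j % 2 == 1 then "S" else "")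
        else ""
      pvLoopA (rest.drop (pvCountRun cc rest)) (retval ++ piece)
termination_by l _ => l.length
decreasing_by simp [List.length_drop]

def name_to_latex (name : String) : String :=
  let retval := pvLoopA name.toList "$"
  let retval := retval ++ "$"
  if retval == "$$" then "$I$" else retval

-- ===== PORT B =====
-- Source B's inner helper piece(c, n)
def pvPiece (c : Char) (n : Nat) : String :=
  if c == 'T' then (if n == 1 then "T" else "T^{" ++ PySem.Int.toStr (n : Int) ++ "}")
  else if c == 'U' then "T^{" ++ PySem.Int.toStr (-(n : Int)) ++ "}"
  else if c == 'S' then (if n % 2 == 1 then "S" else "")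
  else ""

-- one step of Source B's for loop: state = (body, pending run prev/count as Option (Char × Nat))
def pvStepB (st : String × Option (Char × Nat)) (ch : Char) : String × Option (Char × Nat) :=
  match st with
  | (body, some (prev, count)) =>
      if ch == prev then (body, some (prev, count + 1))
      else (body ++ pvPiece prev count, some (ch, 1))
  | (body, none) => (body, some (ch, 1))

def name_to_latex_alt (name : String) : String :=
  let st := name.toList.foldl pvStepB ("", none)
  let body := match st.2 with
    | some (prev, count) => st.1 ++ pvPiece prev count
    | none => st.1
  if body == "" then "$I$" else "$" ++ body ++ "$"

-- ===== PRECONDITION & SPEC =====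
def Spec_name_to_latex (name : String) (out : String) : Prop := out = name_to_latex_alt name
instance (name : String) (out : String) : Decidable (Spec_name_to_latex name out) := by unfold Spec_name_to_latex; infer_instance

-- ===== CLAIM (what is proved, stated in full; the proofs are below) =====
def Claim_equal_name_to_latex : Prop := ∀ (name : String), Dom_name_to_latex name → Spec_name_to_latex name (name_to_latex name)

-- ===== LEMMAS AND PROOFS =====

-- Source B's final flush of the pending run, as a named function (defeq to the port's match)
def pvFlush (st : String × Option (Char × Nat)) : String :=
  match st.2 with
  | some (prev, count) => st.1 ++ pvPiece prev count
  | none => st.1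

-- run-length view used only by the proofs, with a "pending run (c, n)" variant
def pvRuns : List Char → List (Char × Nat)
  | [] => []
  | c :: rest =>
      (c, 1 + (rest.takeWhile (· == c)).length) :: pvRuns (rest.dropWhile (· == c))
termination_by l => l.length
decreasing_by
  have := List.length_dropWhile_le (p := (· == c)) (l := rest)
  simp; omega

def pvRunsP (c : Char) (n : Nat) : List Char → List (Char × Nat)
  | [] => [(c, n)]
  | x :: xs => if x == c then pvRunsP c (n + 1) xs else (c, n) :: pvRunsP x 1 xs

def pvRender : List (Char × Nat) → String
  | [] => ""
  | (c, n) :: rs => pvPiece c n ++ pvRender rs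

theorem pvCountRun_eq (c : Char) (xs : List Char) :
    pvCountRun c xs = (xs.takeWhile (· == c)).length := by
  induction xs with
  | nil => rfl
  | cons x xs ih =>
    simp only [pvCountRun, List.takeWhile]
    by_cases h : x == c
    · simp [h, ih]; omega
    · simp [h]

theorem pvDropCountRun_eq (c : Char) (xs : List Char) :
    xs.drop (pvCountRun c xs) = xs.dropWhile (· == c) := by
  induction xs with
  | nil => rfl
  | cons x xs ih =>
    simp only [pvCountRun, List.dropWhile]
    by_cases h : x == c
    · simp [h, Nat.add_comm 1 (pvCountRun c xs), ih]
    · simp [h]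

theorem pvLoopA_eq (l : List Char) (acc : String) :
    pvLoopA l acc = acc ++ pvRender (pvRuns l) := by
  induction hl : l.length using Nat.strong_induction_on generalizing l acc with
  | _ n ih =>
    cases l with
    | nil => rw [pvLoopA.eq_1, pvRuns.eq_1]; simp [pvRender]
    | cons c rest =>
      rw [pvLoopA.eq_2, pvRuns.eq_2, pvRender, pvDropCountRun_eq, pvCountRun_eq]
      have hlen : (rest.dropWhile (· == c)).length < n := by
        have := List.length_dropWhile_le (p := (· == c)) (l := rest)
        simp at hl; omega
      rw [ih _ hlen _ _ rfl, pvPiece, String.append_assoc]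

theorem pvRunsP_eq (c : Char) (n : Nat) (xs : List Char) :
    pvRunsP c n xs = (c, n + (xs.takeWhile (· == c)).length) :: pvRuns (xs.dropWhile (· == c)) := by
  induction xs generalizing c n with
  | nil => simp [pvRunsP, pvRuns]
  | cons x xs ih =>
    simp only [pvRunsP]
    by_cases h : x == c
    · have hx : x = c := by simpa using h
      subst hx
      rw [if_pos (by simp), ih x (n + 1)]
      simp [List.takeWhile, List.dropWhile, Nat.add_assoc, Nat.add_comm]
    · rw [if_neg h, ih x 1]
      simp only [List.takeWhile, List.dropWhile, h]
      rw [pvRuns.eq_2]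
      simp

theorem pvFoldB_pending (l : List Char) (body : String) (c : Char) (n : Nat) :
    pvFlush (l.foldl pvStepB (body, some (c, n))) = body ++ pvRender (pvRunsP c n l) := by
  induction l generalizing body c n with
  | nil => simp [pvFlush, pvRunsP, pvRender]
  | cons x xs ih =>
    simp only [List.foldl_cons, pvStepB, pvRunsP]
    by_cases h : x == c
    · rw [if_pos h, if_pos h]
      exact ih body c (n + 1)
    · rw [if_neg h, if_neg h, ih (body ++ pvPiece c n) x 1, pvRender, String.append_assoc]

theorem pvFlush_runs_eq (l : List Char) :
    pvFlush (l.foldl pvStepB ("", none)) = pvRender (pvRuns l) := by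
  cases l with
  | nil => simp [pvFlush, pvRuns, pvRender]
  | cons c rest =>
    simp only [List.foldl_cons, pvStepB]
    rw [pvFoldB_pending rest "" c 1, pvRunsP_eq, pvRuns.eq_2]
    simp

theorem pvDollar_eq (r : String) : (("$" ++ r ++ "$") == "$$") = (r == "") := by
  cases h : r == "" with
  | true => simp at h; simp [h]
  | false =>
    have hr : r ≠ "" := by simpa using h
    have hne : ("$" ++ r ++ "$") ≠ "$$" := by
      intro he
      have hlen := congrArg String.length he
      have h1 : "$".length = 1 := by decide
      have h2 : "$$".length = 2 := by decide
      rw [String.length_append, String.length_append, h1, h2] at hlen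
      exact hr (String.length_eq_zero_iff.mp (by omega))
    simpa using hne

-- ===== VERDICT (by name: the statement is the Claim_ definition above) =====
theorem name_to_latex_spec : Claim_equal_name_to_latex := by
  intro name _
  show (if (pvLoopA name.toList "$" ++ "$") == "$$" then "$I$"
        else pvLoopA name.toList "$" ++ "$")
      = (if pvFlush (name.toList.foldl pvStepB ("", none)) == "" then "$I$"
         else "$" ++ pvFlush (name.toList.foldl pvStepB ("", none)) ++ "$")
  rw [pvLoopA_eq, pvFlush_runs_eq, pvDollar_eq]
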